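-- pv_equiv track=rewrite | github.com/ceastld/alg | leetcode/hot200/dp/h1049.ans.py | lastStoneWeightII_alternative
-- ===== SOURCE A (Python) =====
-- from typing import List
--
-- def lastStoneWeightII_alternative(stones: List[int]) -> int:
--     """
--     替代解法：使用集合
--
--     解题思路：
--     1. 使用集合存储所有可能的和
--     2. 逐步更新集合
--
--     时间复杂度：O(n * sum)
--     空间复杂度：O(sum)
--     """
--     if not stones:
--         return 0
--
--     total_sum = sum(stones)
--     target = total_sum // 2
--
--     # 使用集合存储所有可能的和
--     possible_sums = {0}
--
--     for stone in stones:
--         # 创建新的集合，避免重复使用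
--         new_sums = set()
--         for s in possible_sums:
--             new_sum = s + stone
--             if new_sum <= target:
--                 new_sums.add(new_sum)
--
--         possible_sums.update(new_sums)
--
--     # 找到最大的可达重量
--     max_sum = 0
--     for s in possible_sums:
--         if s <= target:
--             max_sum = max(max_sum, s)
--
--     return total_sum - 2 * max_sum
-- ===== SOURCE B (Python) =====
-- from typing import List
--
-- def lastStoneWeightII_alternative(stones: List[int]) -> int:
--     """Top-down take/skip recursion on (index, current sum) with a memo dict:
--     best(i, cur) = the largest sum reachable from cur using stones[i:] while
--     every intermediate sum stays <= target. Answer = total - 2 * best(0, 0)."""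
--     total = sum(stones)
--     target = total // 2
--     n = len(stones)
--     memo = {}
--
--     def best(i, cur):
--         if i == n:
--             return cur
--         key = (i, cur)
--         hit = memo.get(key)
--         if hit is not None:
--             return hit
--         res = best(i + 1, cur)
--         nxt = cur + stones[i]
--         if nxt <= target:
--             res = max(res, best(i + 1, nxt))
--         memo[key] = res
--         return res
--
--     return total - 2 * best(0, 0)
-- ===== Notes on version B (the rewrite author's own statement) =====
-- stated objective: alternative
-- what changed: Replaces A's bottom-up iteration that rebuilds a set of all reachable sums per stone (plus a final scan for the maximum) with a top-down memoized take/skip recursion best(i, cur) on (stone index, current sum), which returns the maximum directly and never materialises the set of sums.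
import Mathlib
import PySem

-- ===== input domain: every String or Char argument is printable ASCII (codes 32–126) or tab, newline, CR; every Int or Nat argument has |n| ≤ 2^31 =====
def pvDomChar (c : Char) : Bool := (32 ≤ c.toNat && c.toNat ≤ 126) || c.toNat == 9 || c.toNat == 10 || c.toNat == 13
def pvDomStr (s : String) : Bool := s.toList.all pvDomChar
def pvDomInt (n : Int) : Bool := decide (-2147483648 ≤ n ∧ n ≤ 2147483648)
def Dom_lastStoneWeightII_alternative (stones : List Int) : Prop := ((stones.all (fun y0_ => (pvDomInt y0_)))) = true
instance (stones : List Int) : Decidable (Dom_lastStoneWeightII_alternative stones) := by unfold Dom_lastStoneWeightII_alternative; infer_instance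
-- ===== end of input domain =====

-- B replaces A's bottom-up set-of-reachable-sums iteration (set rebuilt per stone + final max scan)
-- by a top-down memoized take/skip recursion best(i, cur) on (stone index, current sum).
-- Same exact return value on every input.


-- ===== PORT A =====
def lastStoneWeightII_alternative (stones : List Int) : Int :=
  if stones = [] then 0
  else
    let total := stones.foldl (· + ·) 0
    let target := PySem.Int.floordiv total 2
    let possible : PySem.Set Int :=
      stones.foldl (fun ps stone =>
        let news : PySem.Set Int :=
          ps.foldl (fun ns s =>
            let n := s + stone
            if n ≤ target then PySem.Set.add ns n else ns) PySem.Set.empty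
        PySem.Set.update ps news) (PySem.Set.ofList [0])
    let maxSum := possible.foldl (fun m s => if s ≤ target then max m s else m) 0
    total - 2 * maxSum

-- ===== PORT B =====
-- Source B's inner 'best(i, cur)': take/skip recursion with a memo dict keyed by (i, cur);
-- the dict is threaded through (Python mutates 'memo' in place), result = (value, memo)
def pvBestMemo (t : Int) : List Int → Nat → Int → PySem.Dict (Nat × Int) Int →
    Int × PySem.Dict (Nat × Int) Int
  | [], _, cur, memo => (cur, memo)
  | x :: xs, i, cur, memo =>
    match memo.get? (i, cur) with
    | some v => (v, memo)
    | none =>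
      let p1 := pvBestMemo t xs (i + 1) cur memo
      let nxt := cur + x
      if nxt ≤ t then
        let p2 := pvBestMemo t xs (i + 1) nxt p1.2
        let res := max p1.1 p2.1
        (res, p2.2.insert (i, cur) res)
      else
        (p1.1, p1.2.insert (i, cur) p1.1)

def lastStoneWeightII_alternative_alt (stones : List Int) : Int :=
  let total := stones.foldl (· + ·) 0
  let target := PySem.Int.floordiv total 2
  total - 2 * (pvBestMemo target stones 0 0 PySem.Dict.empty).1

-- ===== PRECONDITION & SPEC =====
def Spec_lastStoneWeightII_alternative (stones : List Int) (out : Int) : Prop := out = lastStoneWeightII_alternative_alt stones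
instance (stones : List Int) (out : Int) : Decidable (Spec_lastStoneWeightII_alternative stones out) := by unfold Spec_lastStoneWeightII_alternative; infer_instance

-- ===== CLAIM (what is proved, stated in full; the proofs are below) =====
def Claim_equal_lastStoneWeightII_alternative : Prop := ∀ (stones : List Int), Dom_lastStoneWeightII_alternative stones → Spec_lastStoneWeightII_alternative stones (lastStoneWeightII_alternative stones)

-- ===== LEMMAS AND PROOFS =====

-- the memo-free value of Source B's recursion (proof helper)
def pvBest (t : Int) : List Int → Int → Int
  | [], cur => cur
  | x :: xs, cur =>
    let r := pvBest t xs cur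
    if cur + x ≤ t then max r (pvBest t xs (cur + x)) else r

-- a memo is good if every stored entry is the memo-free value of the corresponding suffix
def pvGood (t : Int) (stones : List Int) (memo : PySem.Dict (Nat × Int) Int) : Prop :=
  ∀ (j : Nat) (c v : Int), memo.get? (j, c) = some v → v = pvBest t (stones.drop j) c

theorem pvGood_empty (t : Int) (stones : List Int) : pvGood t stones PySem.Dict.empty := by
  intro j c v h
  simp [PySem.Dict.get?_empty] at h

-- memoization is sound: on a consistent (suffix, index) pair the memoized recursion
-- returns the memo-free value and keeps the memo good
theorem pvBestMemo_sound (t : Int) (stones : List Int) :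
    ∀ (l : List Int) (i : Nat) (cur : Int) (memo : PySem.Dict (Nat × Int) Int),
      stones.drop i = l → pvGood t stones memo →
      (pvBestMemo t l i cur memo).1 = pvBest t l cur
        ∧ pvGood t stones (pvBestMemo t l i cur memo).2 := by
  intro l
  induction l with
  | nil => intro i cur memo _ hgood; exact ⟨rfl, hgood⟩
  | cons x xs ih =>
    intro i cur memo hdrop hgood
    have hdrop' : stones.drop (i + 1) = xs := by
      rw [← List.drop_drop, hdrop]
      rfl
    simp only [pvBestMemo]
    cases hget : memo.get? (i, cur) with
    | some v =>
      have hv := hgood i cur v hget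
      rw [hdrop] at hv
      exact ⟨hv.symm ▸ rfl, hgood⟩
    | none =>
      obtain ⟨h1, hg1⟩ := ih (i + 1) cur memo hdrop' hgood
      by_cases hle : cur + x ≤ t
      · obtain ⟨h2, hg2⟩ := ih (i + 1) (cur + x) (pvBestMemo t xs (i + 1) cur memo).2 hdrop' hg1
        rw [if_pos hle]
        constructor
        · simp only [pvBest, h1, h2, if_pos hle]
        · intro j c v h
          rw [PySem.Dict.get?_insert] at h
          by_cases hkey : ((j, c) : Nat × Int) = (i, cur)
          · rw [if_pos hkey] at h
            obtain ⟨hj, hc⟩ := Prod.mk.injEq .. ▸ hkey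
            subst hj; subst hc
            injection h with h
            rw [hdrop, ← h]
            simp only [pvBest, if_pos hle, ← h1, ← h2]
          · rw [if_neg hkey] at h
            exact hg2 j c v h
      · rw [if_neg hle]
        constructor
        · simp only [pvBest, h1, if_neg hle]
        · intro j c v h
          rw [PySem.Dict.get?_insert] at h
          by_cases hkey : ((j, c) : Nat × Int) = (i, cur)
          · rw [if_pos hkey] at h
            obtain ⟨hj, hc⟩ := Prod.mk.injEq .. ▸ hkey
            subst hj; subst hc
            injection h with h
            rw [hdrop, ← h]
            simp only [pvBest, if_neg hle, ← h1]
          · rw [if_neg hkey] at h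
            exact hg1 j c v h

-- the sums reachable from cur along l with every intermediate sum capped by t
def pvReach (t : Int) : List Int → Int → List Int
  | [], s => [s]
  | x :: xs, s => pvReach t xs s ++ (if s + x ≤ t then pvReach t xs (s + x) else [])

theorem pv_self_mem_reach (t : Int) (l : List Int) (s : Int) : s ∈ pvReach t l s := by
  induction l generalizing s with
  | nil => simp [pvReach]
  | cons x xs ih => simp only [pvReach, List.mem_append]; exact Or.inl (ih s)

theorem pv_best_mem_reach (t : Int) (l : List Int) (s : Int) : pvBest t l s ∈ pvReach t l s := by
  induction l generalizing s with
  | nil => simp [pvBest, pvReach]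
  | cons x xs ih =>
    simp only [pvBest, pvReach, List.mem_append]
    by_cases h : s + x ≤ t
    · rw [if_pos h, if_pos h]
      rcases max_choice (pvBest t xs s) (pvBest t xs (s + x)) with hm | hm
      · rw [hm]; exact Or.inl (ih s)
      · rw [hm]; exact Or.inr (ih (s + x))
    · rw [if_neg h]; exact Or.inl (ih s)

theorem pv_reach_le_best (t : Int) (l : List Int) (s : Int) :
    ∀ y ∈ pvReach t l s, y ≤ pvBest t l s := by
  induction l generalizing s with
  | nil => simp [pvBest, pvReach]
  | cons x xs ih =>
    intro y hy
    simp only [pvReach, List.mem_append] at hy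
    simp only [pvBest]
    by_cases h : s + x ≤ t
    · rw [if_pos h] at hy ⊢
      rcases hy with hy | hy
      · exact le_trans (ih s y hy) (le_max_left _ _)
      · exact le_trans (ih (s + x) y hy) (le_max_right _ _)
    · rw [if_neg h] at hy ⊢
      rcases hy with hy | hy
      · exact ih s y hy
      · simp at hy

theorem pv_reach_capped (t : Int) (l : List Int) (s : Int) :
    ∀ y ∈ pvReach t l s, y = s ∨ y ≤ t := by
  induction l generalizing s with
  | nil => simp [pvReach]
  | cons x xs ih =>
    intro y hy
    simp only [pvReach, List.mem_append] at hy
    by_cases h : s + x ≤ t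
    · rw [if_pos h] at hy
      rcases hy with hy | hy
      · exact ih s y hy
      · rcases ih (s + x) y hy with rfl | hle
        · exact Or.inr h
        · exact Or.inr hle
    · rw [if_neg h] at hy
      rcases hy with hy | hy
      · exact ih s y hy
      · simp at hy

-- membership in A's inner "new_sums" loop
theorem pv_mem_foldl_add_if (t stone : Int) (l : List Int) (ns : PySem.Set Int) (y : Int) :
    y ∈ l.foldl (fun ns s => if s + stone ≤ t then PySem.Set.add ns (s + stone) else ns) ns
    ↔ y ∈ ns ∨ ∃ s ∈ l, s + stone ≤ t ∧ y = s + stone := by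
  induction l generalizing ns with
  | nil => simp
  | cons x xs ih =>
    simp only [List.foldl_cons]
    by_cases hx : x + stone ≤ t
    · rw [if_pos hx, ih, PySem.Set.mem_add]
      constructor
      · rintro (⟨h | h⟩ | ⟨s, hs, hst, rfl⟩)
        · exact Or.inl h
        · exact Or.inr ⟨x, List.mem_cons_self, hx, h⟩
        · exact Or.inr ⟨s, List.mem_cons_of_mem _ hs, hst, rfl⟩
      · rintro (h | ⟨s, hs, hst, rfl⟩)
        · exact Or.inl (Or.inl h)
        · rw [List.mem_cons] at hs
          rcases hs with rfl | hs
          · exact Or.inl (Or.inr rfl)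
          · exact Or.inr ⟨s, hs, hst, rfl⟩
    · rw [if_neg hx, ih]
      constructor
      · rintro (h | ⟨s, hs, hst, rfl⟩)
        · exact Or.inl h
        · exact Or.inr ⟨s, List.mem_cons_of_mem _ hs, hst, rfl⟩
      · rintro (h | ⟨s, hs, hst, rfl⟩)
        · exact Or.inl h
        · rw [List.mem_cons] at hs
          rcases hs with rfl | hs
          · exact absurd hst hx
          · exact Or.inr ⟨s, hs, hst, rfl⟩

-- A's outer set fold collects exactly the sums reachable from some member of the start set
theorem pv_mem_setfold (t : Int) (l : List Int) (ps : PySem.Set Int) (y : Int) :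
    (y ∈ l.foldl (fun ps stone =>
        PySem.Set.update ps (ps.foldl (fun ns s =>
          if s + stone ≤ t then PySem.Set.add ns (s + stone) else ns) PySem.Set.empty)) ps)
    ↔ ∃ s ∈ ps, y ∈ pvReach t l s := by
  induction l generalizing ps with
  | nil =>
    simp only [List.foldl_nil, pvReach, List.mem_singleton]
    constructor
    · intro h; exact ⟨y, h, rfl⟩
    · rintro ⟨s, hs, rfl⟩; exact hs
  | cons x xs ih =>
    simp only [List.foldl_cons]
    rw [ih]
    constructor
    · rintro ⟨s', hs', hy⟩
      rw [PySem.Set.mem_update, pv_mem_foldl_add_if] at hs'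
      simp only [PySem.Set.empty, List.not_mem_nil, false_or] at hs'
      rcases hs' with hs' | ⟨s, hs, hst, rfl⟩
      · exact ⟨s', hs', by simp only [pvReach, List.mem_append]; exact Or.inl hy⟩
      · exact ⟨s, hs, by simp only [pvReach, List.mem_append, if_pos hst]; exact Or.inr hy⟩
    · rintro ⟨s, hs, hy⟩
      simp only [pvReach, List.mem_append] at hy
      by_cases hst : s + x ≤ t
      · rw [if_pos hst] at hy
        rcases hy with hy | hy
        · refine ⟨s, ?_, hy⟩
          rw [PySem.Set.mem_update]; exact Or.inl hs
        · refine ⟨s + x, ?_, hy⟩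
          rw [PySem.Set.mem_update, pv_mem_foldl_add_if]
          exact Or.inr (Or.inr ⟨s, hs, hst, rfl⟩)
      · rw [if_neg hst] at hy
        simp only [List.not_mem_nil, or_false] at hy
        refine ⟨s, ?_, hy⟩
        rw [PySem.Set.mem_update]; exact Or.inl hs

-- characterisation of A's final max loop
theorem pv_foldl_max_props (t : Int) (L : List Int) (a : Int) :
    a ≤ L.foldl (fun m s => if s ≤ t then max m s else m) a
    ∧ (L.foldl (fun m s => if s ≤ t then max m s else m) a = a
        ∨ L.foldl (fun m s => if s ≤ t then max m s else m) a ∈ L)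
    ∧ ∀ s ∈ L, s ≤ t → s ≤ L.foldl (fun m s => if s ≤ t then max m s else m) a := by
  induction L generalizing a with
  | nil => simp
  | cons x xs ih =>
    simp only [List.foldl_cons]
    by_cases hx : x ≤ t
    · rw [if_pos hx]
      obtain ⟨h1, h2, h3⟩ := ih (max a x)
      refine ⟨le_trans (le_max_left _ _) h1, ?_, ?_⟩
      · rcases h2 with h | h
        · by_cases hax : x ≤ a
          · left; rw [h]; omega
          · right
            have hx' : max a x = x := by omega
            rw [h, hx']
            exact List.mem_cons_self
        · right; right; exact h
      · intro s hs hst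
        rw [List.mem_cons] at hs
        rcases hs with rfl | hs
        · exact le_trans (le_max_right _ _) h1
        · exact h3 s hs hst
    · rw [if_neg hx]
      obtain ⟨h1, h2, h3⟩ := ih a
      refine ⟨h1, ?_, ?_⟩
      · rcases h2 with h | h
        · left; exact h
        · right; right; exact h
      · intro s hs hst
        rw [List.mem_cons] at hs
        rcases hs with rfl | hs
        · exact absurd hst hx
        · exact h3 s hs hst

-- ===== VERDICT (by name: the statement is the Claim_ definition above) =====
theorem lastStoneWeightII_alternative_spec : Claim_equal_lastStoneWeightII_alternative := by
  intro stones _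
  unfold Spec_lastStoneWeightII_alternative
  by_cases hne : stones = []
  · subst hne; decide
  · simp only [lastStoneWeightII_alternative, lastStoneWeightII_alternative_alt, if_neg hne]
    set total := stones.foldl (· + ·) 0 with htotal
    set target := PySem.Int.floordiv total 2 with htarget
    -- B's value is the memo-free recursion value
    obtain ⟨hmemo, _⟩ := pvBestMemo_sound target stones stones 0 0 PySem.Dict.empty rfl
      (pvGood_empty target stones)
    rw [hmemo]
    set best := pvBest target stones 0 with hbest
    -- A's max loop over the collected set
    set P := stones.foldl (fun ps stone =>
      PySem.Set.update ps (ps.foldl (fun ns s =>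
        if s + stone ≤ target then PySem.Set.add ns (s + stone) else ns) PySem.Set.empty))
      (PySem.Set.ofList [0]) with hP
    obtain ⟨hge0, hin, hub⟩ := pv_foldl_max_props target P 0
    set maxA := P.foldl (fun m s => if s ≤ target then max m s else m) 0 with hmaxA
    have hmemP : ∀ y : Int, y ∈ P ↔ y ∈ pvReach target stones 0 := by
      intro y
      rw [hP, pv_mem_setfold]
      constructor
      · rintro ⟨s, hs, hy⟩
        rw [PySem.Set.mem_ofList, List.mem_singleton] at hs
        subst hs; exact hy
      · intro hy
        exact ⟨0, by rw [PySem.Set.mem_ofList]; simp, hy⟩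
    have hbest0 : (0 : Int) ≤ best :=
      pv_reach_le_best target stones 0 0 (pv_self_mem_reach target stones 0)
    have h1 : maxA ≤ best := by
      rcases hin with h | h
      · omega
      · exact pv_reach_le_best target stones 0 maxA ((hmemP maxA).mp h)
    have h2 : best ≤ maxA := by
      rcases pv_reach_capped target stones 0 best (pv_best_mem_reach target stones 0) with h | h
      · omega
      · exact hub best ((hmemP best).mpr (pv_best_mem_reach target stones 0)) h
    have : maxA = best := le_antisymm h1 h2
    rw [this]
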